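-- pv_equiv track=rewrite | github.com/IPADS-SAI/MobiClaw | mobiclaw/orchestrator/execution.py | _aggregate_replies
-- ===== SOURCE A (Python) =====
-- from typing import Any
--
-- def _aggregate_replies(executions: list[dict[str, Any]]) -> str:
--     if not executions:
--         return ""
--     last_reply = str(executions[-1].get("reply") or "").strip()
--     if last_reply:
--         return last_reply
--     for item in reversed(executions[:-1]):
--         text = str(item.get("reply") or "").strip()
--         if text:
--             return text
--     return ""
-- ===== SOURCE B (Python) =====
-- def _aggregate_replies(executions: list[dict[str, object]]) -> str:
--     result = ""
--     for item in executions: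
--         text = str(item.get("reply") or "").strip()
--         if text:
--             result = text
--     return result
-- ===== Notes on version B (the rewrite author's own statement) =====
-- stated objective: simpler
-- what changed: Single forward pass with a last-match accumulator replaces the special-cased last element plus reverse scan with early return.
import Mathlib
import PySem

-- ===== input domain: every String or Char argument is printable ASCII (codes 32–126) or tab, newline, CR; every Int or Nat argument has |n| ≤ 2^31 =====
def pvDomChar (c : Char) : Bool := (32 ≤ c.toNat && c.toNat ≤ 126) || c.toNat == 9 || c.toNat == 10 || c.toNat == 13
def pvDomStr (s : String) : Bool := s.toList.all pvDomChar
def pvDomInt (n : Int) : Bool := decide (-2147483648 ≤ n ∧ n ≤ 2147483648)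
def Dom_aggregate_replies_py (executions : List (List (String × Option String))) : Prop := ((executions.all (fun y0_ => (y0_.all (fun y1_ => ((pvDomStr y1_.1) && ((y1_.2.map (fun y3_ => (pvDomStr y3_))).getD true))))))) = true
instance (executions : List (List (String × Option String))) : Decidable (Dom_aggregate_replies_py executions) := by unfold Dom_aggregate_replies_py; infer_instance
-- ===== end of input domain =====

-- B replaces A's last-element special case and reverse scan with one forward fold keeping the most recent non-empty stripped reply (simpler decomposition).


-- shared predicate: str(item.get("reply") or "").strip()  (get? of the dict, None and "" both coerce to "")
def pvReplyText (item : List (String × Option String)) : String :=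
  PySem.Str.strip ((((PySem.Dict.mk item).get? "reply").join).getD "")

-- ===== PORT A =====
-- the 'for item in reversed(executions[:-1]): … return text' loop with its early return
def pvScanA : List (List (String × Option String)) → String
  | [] => ""
  | item :: rest =>
    let text := pvReplyText item
    if text ≠ "" then text else pvScanA rest

def aggregate_replies_py (executions : List (List (String × Option String))) : String :=
  match executions.getLast? with
  | none => ""                                   -- if not executions: return ""
  | some last =>                                 -- executions[-1] (list known non-empty)
    let last_reply := pvReplyText last
    if last_reply ≠ "" then last_reply
    else pvScanA executions.dropLast.reverse     -- reversed(executions[:-1])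

-- ===== PORT B =====
def aggregate_replies_py_alt (executions : List (List (String × Option String))) : String :=
  executions.foldl
    (fun result item =>
      let text := pvReplyText item
      if text ≠ "" then text else result) ""

-- ===== PRECONDITION & SPEC =====
def Spec_aggregate_replies_py (executions : List (List (String × Option String))) (out : String) : Prop := out = aggregate_replies_py_alt executions
instance (executions : List (List (String × Option String))) (out : String) : Decidable (Spec_aggregate_replies_py executions out) := by unfold Spec_aggregate_replies_py; infer_instance

-- ===== CLAIM (what is proved, stated in full; the proofs are below) =====
def Claim_equal_aggregate_replies_py : Prop := ∀ (executions : List (List (String × Option String))), Dom_aggregate_replies_py executions → Spec_aggregate_replies_py executions (aggregate_replies_py executions)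

-- ===== LEMMAS AND PROOFS =====

theorem pvScanA_append_singleton (l : List (List (String × Option String))) (x : List (String × Option String)) :
    pvScanA (l ++ [x]) = (if pvScanA l ≠ "" then pvScanA l else pvReplyText x) := by
  induction l with
  | nil => simp [pvScanA]
  | cons a t ih =>
    simp only [List.cons_append, pvScanA, ih]
    by_cases h : pvReplyText a = "" <;> simp [h]

theorem pvFoldB_eq_scan (l : List (List (String × Option String))) (acc : String) :
    l.foldl (fun result item =>
      let text := pvReplyText item
      if text ≠ "" then text else result) acc
    = (if pvScanA l.reverse ≠ "" then pvScanA l.reverse else acc) := by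
  induction l generalizing acc with
  | nil => simp [pvScanA]
  | cons a t ih =>
    simp only [List.foldl_cons, ih, List.reverse_cons, pvScanA_append_singleton]
    by_cases h : pvScanA t.reverse = "" <;> by_cases h2 : pvReplyText a = "" <;> simp [h, h2]

-- ===== VERDICT (by name: the statement is the Claim_ definition above) =====
theorem aggregate_replies_py_spec : Claim_equal_aggregate_replies_py := by
  intro executions _
  show aggregate_replies_py executions = aggregate_replies_py_alt executions
  unfold aggregate_replies_py aggregate_replies_py_alt
  rcases h : executions.getLast? with _ | last
  · simp [List.getLast?_eq_none_iff.mp h]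
  · have hne : executions ≠ [] := by rintro rfl; simp at h
    have hl : executions.getLast hne = last := by
      have h' := List.getLast?_eq_some_getLast hne
      rw [h] at h'; exact (Option.some.inj h').symm
    have hx : executions = executions.dropLast ++ [last] := by
      rw [← hl]; exact (List.dropLast_concat_getLast hne).symm
    conv_rhs => rw [hx]
    rw [List.foldl_append, pvFoldB_eq_scan, pvFoldB_eq_scan]
    by_cases h1 : pvReplyText last = "" <;>
      by_cases h2 : pvScanA executions.dropLast.reverse = "" <;> simp [pvScanA, h1, h2]
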